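-- pv_equiv track=rewrite | github.com/aryachiranjeev/AI-1 | PA-2/P21CS007_P21AI002_M19DCS004.py | number_of_entries_in_complete_sample_list
-- ===== SOURCE A (Python) =====
-- def number_of_entries_in_complete_sample_list(no_of_samples,no_of_nodes,location_missing_value,possible_node_values,no_of_rows_with_no_mis_val):
--   count = 0
--   for i in range(no_of_samples):
--     for j in range(no_of_nodes):
--       if(location_missing_value[i][j]==0):
--         count+=len(possible_node_values[j])
--   count+=no_of_rows_with_no_mis_val
--
--   return count
-- ===== SOURCE B (Python) =====
-- def number_of_entries_in_complete_sample_list(no_of_samples, no_of_nodes, location_missing_value, possible_node_values, no_of_rows_with_no_mis_val):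
--     # Count zeros per column first, then one weighted pass over the columns.
--     if no_of_samples > 0 and no_of_nodes > 0:
--         zero_counts = [0] * no_of_nodes
--         for i in range(no_of_samples):
--             row = location_missing_value[i]
--             for j in range(no_of_nodes):
--                 if row[j] == 0:
--                     zero_counts[j] += 1
--     else:
--         zero_counts = []
--     total = no_of_rows_with_no_mis_val
--     for j, c in enumerate(zero_counts):
--         if c:
--             total += c * len(possible_node_values[j])
--     return total
-- ===== Notes on version B (the rewrite author's own statement) =====
-- stated objective: alternative
-- what changed: Instead of adding len(possible_node_values[j]) once per zero cell inside the double loop, B first tallies per-column zero counts and then computes the answer in a single weighted pass over the columns (count[j]*len(possible_node_values[j])).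
import Mathlib
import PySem

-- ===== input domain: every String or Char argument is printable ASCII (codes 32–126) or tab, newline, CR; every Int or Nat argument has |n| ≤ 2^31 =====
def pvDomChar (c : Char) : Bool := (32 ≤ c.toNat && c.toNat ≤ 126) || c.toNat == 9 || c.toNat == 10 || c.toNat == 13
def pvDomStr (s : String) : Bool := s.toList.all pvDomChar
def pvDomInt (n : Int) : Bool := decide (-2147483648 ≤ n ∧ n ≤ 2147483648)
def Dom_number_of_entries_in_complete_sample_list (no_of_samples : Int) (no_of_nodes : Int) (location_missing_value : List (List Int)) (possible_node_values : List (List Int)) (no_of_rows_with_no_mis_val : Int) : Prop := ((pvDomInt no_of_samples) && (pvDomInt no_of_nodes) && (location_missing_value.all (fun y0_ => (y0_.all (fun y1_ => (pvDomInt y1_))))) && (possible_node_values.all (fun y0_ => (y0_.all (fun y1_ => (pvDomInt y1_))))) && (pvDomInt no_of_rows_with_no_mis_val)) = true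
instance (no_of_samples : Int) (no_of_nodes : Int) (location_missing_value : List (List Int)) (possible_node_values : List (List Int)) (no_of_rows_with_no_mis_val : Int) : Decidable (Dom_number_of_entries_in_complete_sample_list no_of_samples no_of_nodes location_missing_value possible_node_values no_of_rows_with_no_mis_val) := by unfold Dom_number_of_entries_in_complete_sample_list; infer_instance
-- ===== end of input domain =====

-- B replaces A's per-cell accumulation by per-column zero counts followed by one weighted pass
-- over the columns (alternative decomposition, same asymptotic cost).

-- ===== PORT A =====
def number_of_entries_in_complete_sample_list (no_of_samples : Int) (no_of_nodes : Int) (location_missing_value : List (List Int)) (possible_node_values : List (List Int)) (no_of_rows_with_no_mis_val : Int) : Int :=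
  let count : Int :=
    (PySem.List.pyRange 0 no_of_samples 1).foldl (fun count i =>
      (PySem.List.pyRange 0 no_of_nodes 1).foldl (fun count j =>
        if PySem.List.pyGetD (PySem.List.pyGetD location_missing_value i []) j 1 = 0 then
          count + ((PySem.List.pyGetD possible_node_values j []).length : Int)
        else count) count) 0
  count + no_of_rows_with_no_mis_val

-- ===== PORT B =====
def number_of_entries_in_complete_sample_list_alt (no_of_samples : Int) (no_of_nodes : Int) (location_missing_value : List (List Int)) (possible_node_values : List (List Int)) (no_of_rows_with_no_mis_val : Int) : Int :=
  let zero_counts : List Int :=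
    if 0 < no_of_samples ∧ 0 < no_of_nodes then
      (PySem.List.pyRange 0 no_of_samples 1).foldl (fun zero_counts i =>
        let row := PySem.List.pyGetD location_missing_value i []
        (PySem.List.pyRange 0 no_of_nodes 1).foldl (fun zero_counts j =>
          if PySem.List.pyGetD row j 1 = 0 then
            PySem.List.pySetD zero_counts j (PySem.List.pyGetD zero_counts j 0 + 1)
          else zero_counts) zero_counts) (List.replicate no_of_nodes.toNat 0)
    else []
  (PySem.List.enumerate zero_counts).foldl (fun total p =>
    if p.2 ≠ 0 then total + p.2 * ((PySem.List.pyGetD possible_node_values p.1 []).length : Int)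
    else total) no_of_rows_with_no_mis_val

-- ===== PRECONDITION & SPEC =====
-- Pre_: exactly the inputs where Python A returns (no IndexError): if there is at least one
-- column, every visited row index is in range; every visited row is long enough; and a
-- possible_node_values entry exists for every zero cell A actually reads.
def Pre_number_of_entries_in_complete_sample_list (no_of_samples : Int) (no_of_nodes : Int) (location_missing_value : List (List Int)) (possible_node_values : List (List Int)) (no_of_rows_with_no_mis_val : Int) : Prop :=
  (0 < no_of_nodes → no_of_samples ≤ (location_missing_value.length : Int)) ∧
  ∀ row ∈ location_missing_value.take no_of_samples.toNat,
    no_of_nodes ≤ (row.length : Int) ∧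
    ∀ p ∈ PySem.List.enumerate (row.take no_of_nodes.toNat), p.2 = 0 → p.1 < (possible_node_values.length : Int)
instance (no_of_samples : Int) (no_of_nodes : Int) (location_missing_value : List (List Int)) (possible_node_values : List (List Int)) (no_of_rows_with_no_mis_val : Int) : Decidable (Pre_number_of_entries_in_complete_sample_list no_of_samples no_of_nodes location_missing_value possible_node_values no_of_rows_with_no_mis_val) := by unfold Pre_number_of_entries_in_complete_sample_list; infer_instance

def pvWitness_number_of_entries_in_complete_sample_list : Int × Int × List (List Int) × List (List Int) × Int :=
  (2, 2, [[0, 1], [1, 0]], [[1, 2], [3]], 1)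

def Spec_number_of_entries_in_complete_sample_list (no_of_samples : Int) (no_of_nodes : Int) (location_missing_value : List (List Int)) (possible_node_values : List (List Int)) (no_of_rows_with_no_mis_val : Int) (out : Int) : Prop := out = number_of_entries_in_complete_sample_list_alt no_of_samples no_of_nodes location_missing_value possible_node_values no_of_rows_with_no_mis_val
instance (no_of_samples : Int) (no_of_nodes : Int) (location_missing_value : List (List Int)) (possible_node_values : List (List Int)) (no_of_rows_with_no_mis_val : Int) (out : Int) : Decidable (Spec_number_of_entries_in_complete_sample_list no_of_samples no_of_nodes location_missing_value possible_node_values no_of_rows_with_no_mis_val out) := by unfold Spec_number_of_entries_in_complete_sample_list; infer_instance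

-- ===== CLAIM (what is proved, stated in full; the proofs are below) =====
def Claim_equal_number_of_entries_in_complete_sample_list : Prop := ∀ (no_of_samples : Int) (no_of_nodes : Int) (location_missing_value : List (List Int)) (possible_node_values : List (List Int)) (no_of_rows_with_no_mis_val : Int), Dom_number_of_entries_in_complete_sample_list no_of_samples no_of_nodes location_missing_value possible_node_values no_of_rows_with_no_mis_val → Pre_number_of_entries_in_complete_sample_list no_of_samples no_of_nodes location_missing_value possible_node_values no_of_rows_with_no_mis_val → Spec_number_of_entries_in_complete_sample_list no_of_samples no_of_nodes location_missing_value possible_node_values no_of_rows_with_no_mis_val (number_of_entries_in_complete_sample_list no_of_samples no_of_nodes location_missing_value possible_node_values no_of_rows_with_no_mis_val)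

-- ===== LEMMAS AND PROOFS =====
-- pvWsum pnv cs s = Σ_k cs[k] * len(pnv[s+k])  (the weighted column sum B's last pass computes)
def pvWsum (pnv : List (List Int)) : List Int → Int → Int
  | [], _ => 0
  | c :: cs, s => c * ((PySem.List.pyGetD pnv s []).length : Int) + pvWsum pnv cs (s + 1)

theorem pvWsum_replicate (pnv : List (List Int)) (n : Nat) (s : Int) :
    pvWsum pnv (List.replicate n 0) s = 0 := by
  induction n generalizing s with
  | zero => simp [pvWsum]
  | succ k ih => simp [List.replicate_succ, pvWsum, ih]

theorem pvFoldl_enumerate_wsum (pnv : List (List Int)) (cs : List Int) (s t : Int) :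
    (PySem.List.enumerate cs s).foldl (fun total p =>
      if p.2 ≠ 0 then total + p.2 * ((PySem.List.pyGetD pnv p.1 []).length : Int)
      else total) t = t + pvWsum pnv cs s := by
  induction cs generalizing s t with
  | nil => simp [PySem.List.enumerate_nil, pvWsum]
  | cons c cs ih =>
    rw [PySem.List.enumerate_cons, List.foldl_cons]
    have hstep : (if ((s, c).2 : Int) ≠ 0 then t + (s, c).2 * ((PySem.List.pyGetD pnv (s, c).1 []).length : Int) else t)
        = t + c * ((PySem.List.pyGetD pnv s []).length : Int) := by
      by_cases h : c = 0 <;> simp [h]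
    rw [hstep, ih, pvWsum]
    ring

theorem pvWsum_set (pnv : List (List Int)) (cs : List Int) (k : Nat) (s : Int) (hk : k < cs.length) :
    pvWsum pnv (cs.set k (cs.getD k 0 + 1)) s
      = pvWsum pnv cs s + ((PySem.List.pyGetD pnv (s + (k : Int)) []).length : Int) := by
  induction cs generalizing k s with
  | nil => simp at hk
  | cons c cs ih =>
    cases k with
    | zero => simp [pvWsum]; ring
    | succ k =>
      simp only [List.getD_cons_succ]
      rw [show (c :: cs).set (k + 1) (cs.getD k 0 + 1) = c :: cs.set k (cs.getD k 0 + 1) from rfl]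
      simp only [pvWsum]
      rw [ih k (s + 1) (by simpa using hk)]
      have : s + 1 + (k : Int) = s + ((k + 1 : Nat) : Int) := by push_cast; ring
      rw [this]; ring

-- generic relational fold lemma: a relation preserved by corresponding steps is preserved by foldl
theorem pvFoldl_rel {α β γ : Type} (R : β → γ → Prop) (f : β → α → β) (g : γ → α → γ)
    (l : List α) (b : β) (c : γ) (hbc : R b c)
    (hstep : ∀ x ∈ l, ∀ b c, R b c → R (f b x) (g c x)) :
    R (l.foldl f b) (l.foldl g c) := by
  induction l generalizing b c with
  | nil => exact hbc
  | cons x xs ih =>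
    exact ih _ _ (hstep x (by simp) b c hbc) (fun y hy => hstep y (by simp [hy]))

-- ===== VERDICT =====
theorem number_of_entries_in_complete_sample_list_spec : Claim_equal_number_of_entries_in_complete_sample_list := by
  intro ns nn lmv pnv m _dom hpre
  unfold Spec_number_of_entries_in_complete_sample_list
  unfold number_of_entries_in_complete_sample_list number_of_entries_in_complete_sample_list_alt
  simp only []
  by_cases hnn : 0 < ns ∧ 0 < nn
  · simp only [if_pos hnn]
    rw [pvFoldl_enumerate_wsum]
    -- relate the two outer folds: B's counts vector tracks A's running count via pvWsum
    have main :
        (fun (counts : List Int) (count : Int) =>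
            counts.length = nn.toNat ∧ pvWsum pnv counts 0 = count)
          ((PySem.List.pyRange 0 ns 1).foldl (fun zero_counts i =>
            (PySem.List.pyRange 0 nn 1).foldl (fun zero_counts j =>
              if PySem.List.pyGetD (PySem.List.pyGetD lmv i []) j 1 = 0 then
                PySem.List.pySetD zero_counts j (PySem.List.pyGetD zero_counts j 0 + 1)
              else zero_counts) zero_counts) (List.replicate nn.toNat 0))
          ((PySem.List.pyRange 0 ns 1).foldl (fun count i =>
            (PySem.List.pyRange 0 nn 1).foldl (fun count j =>
              if PySem.List.pyGetD (PySem.List.pyGetD lmv i []) j 1 = 0 then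
                count + ((PySem.List.pyGetD pnv j []).length : Int)
              else count) count) 0) := by
      apply pvFoldl_rel (R := fun (counts : List Int) (count : Int) => counts.length = nn.toNat ∧ pvWsum pnv counts 0 = count)
      · exact ⟨by simp, pvWsum_replicate pnv nn.toNat 0⟩
      · intro i _hi counts count hR
        apply pvFoldl_rel (R := fun (counts : List Int) (count : Int) => counts.length = nn.toNat ∧ pvWsum pnv counts 0 = count)
        · exact hR
        · intro j hj counts count hR
          obtain ⟨hlen, hsum⟩ := hR
          rw [PySem.List.mem_pyRange_one] at hj
          by_cases hc : PySem.List.pyGetD (PySem.List.pyGetD lmv i []) j 1 = 0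
          · simp only [if_pos hc]
            refine ⟨by simp [PySem.List.length_pySetD, hlen], ?_⟩
            rw [PySem.List.pySetD_of_nonneg (h := hj.1),
                PySem.List.pyGetD_of_nonneg (h := hj.1)]
            have hklt : j.toNat < counts.length := by
              rw [hlen]; omega
            rw [pvWsum_set pnv counts j.toNat 0 hklt]
            have : (0 : Int) + (j.toNat : Int) = j := by omega
            rw [this, hsum]
          · simp only [if_neg hc]
            exact ⟨hlen, hsum⟩
    rw [main.2]
    ring
  · -- no rows or no columns: A's double loop contributes nothing, B's counts vector is empty
    simp only [if_neg hnn]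
    rw [pvFoldl_enumerate_wsum]
    simp only [pvWsum]
    rcases not_and_or.mp hnn with h | h
    · have : (PySem.List.pyRange 0 ns 1) = [] := PySem.List.pyRange_one_eq_nil (by omega)
      simp [this]
    · have : (PySem.List.pyRange 0 nn 1) = [] := PySem.List.pyRange_one_eq_nil (by omega)
      simp [this]
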